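-- pv_equiv track=rewrite | github.com/ldpbuaa/ipad | datafree/utils/misc.py | get_shot_num
-- ===== SOURCE A (Python) =====
-- import copy
--
-- def get_shot_thld(class_count):
--     """ get many / low shot threshold
--     """
--     sorted_class_count = copy.deepcopy(class_count)
--     sorted_class_count.sort(reverse=True)
--     num_per_cls = len(sorted_class_count) // 3
--     return sorted_class_count[num_per_cls], sorted_class_count[-(num_per_cls+1)]
--
-- def get_shot_num(train_class_counts):
--     shot_num = {'many':0, 'medium':0, 'few':0}
--     many_shot_thr, low_shot_thr = get_shot_thld(train_class_counts)
--     for i in train_class_counts: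
--         if i > many_shot_thr:
--             shot_num['many'] += 1
--         elif i < low_shot_thr:
--             shot_num['few'] += 1
--         else:
--             shot_num['medium'] += 1
--     return shot_num
-- ===== SOURCE B (Python) =====
-- def _kth_largest(xs, k):
--     # iterative quickselect (middle pivot): k-th largest, 0-indexed; raises IndexError on empty xs
--     while True:
--         p = xs[len(xs) // 2]
--         greater = [x for x in xs if x > p]
--         if k < len(greater):
--             xs = greater
--             continue
--         eq = xs.count(p)
--         if k < len(greater) + eq:
--             return p
--         k -= len(greater) + eq
--         xs = [x for x in xs if x < p]
--
-- def get_shot_num(train_class_counts):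
--     n = len(train_class_counts)
--     k = n // 3
--     many_thr = _kth_largest(train_class_counts, k)
--     low_thr = _kth_largest(train_class_counts, n - 1 - k)
--     many = sum(1 for x in train_class_counts if x > many_thr)
--     few = sum(1 for x in train_class_counts if x < low_thr)
--     return {'many': many, 'medium': n - many - few, 'few': few}
-- ===== Notes on version B (the rewrite author's own statement) =====
-- stated objective: faster
-- what changed: A deep-copies and fully sorts the list (descending) just to read off the two order-statistic thresholds; B finds each threshold with an iterative quickselect (middle pivot, no sort) and then counts the three buckets with linear passes, returning medium as n - many - few.
import Mathlib
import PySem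

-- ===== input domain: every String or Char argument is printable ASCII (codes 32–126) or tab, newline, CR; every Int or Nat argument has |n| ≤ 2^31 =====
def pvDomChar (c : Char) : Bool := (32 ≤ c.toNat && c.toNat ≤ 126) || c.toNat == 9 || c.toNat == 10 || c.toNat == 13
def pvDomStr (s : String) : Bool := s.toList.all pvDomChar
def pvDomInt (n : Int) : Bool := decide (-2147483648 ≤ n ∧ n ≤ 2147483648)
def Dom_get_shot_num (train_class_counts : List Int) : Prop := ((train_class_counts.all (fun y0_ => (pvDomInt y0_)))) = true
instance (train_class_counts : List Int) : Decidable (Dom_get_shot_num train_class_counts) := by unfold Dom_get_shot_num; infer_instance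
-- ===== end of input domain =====

-- B replaces A's full descending sort (used only to read off two order-statistic thresholds)
-- by a quickselect per threshold plus linear counting passes (objective: faster — an
-- expected-linear selection replaces the sort; see claim.json).

-- ===== PORT A =====
def get_shot_num (train_class_counts : List Int) : List (String × Int) :=
  let sorted_class_count := PySem.List.sorted train_class_counts (fun x => x) true
  let num_per_cls := PySem.Int.floordiv (train_class_counts.length : Int) 3
  match PySem.List.pyGet? sorted_class_count num_per_cls,
        PySem.List.pyGet? sorted_class_count (-(num_per_cls + 1)) with
  | some many_shot_thr, some low_shot_thr =>
    (train_class_counts.foldl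
      (fun d i =>
        if many_shot_thr < i then d.modify "many" 0 (· + 1)
        else if i < low_shot_thr then d.modify "few" 0 (· + 1)
        else d.modify "medium" 0 (· + 1))
      (PySem.Dict.ofList [("many", (0 : Int)), ("medium", 0), ("few", 0)])).items
  | _, _ => []

-- ===== PORT B =====
def kthLargest : List Int → Nat → Int
  | [], _ => 0
  | x :: t, k =>
    let xs := x :: t
    let p := xs[xs.length / 2]'(Nat.div_lt_self (Nat.succ_pos _) (by norm_num))
    let greater := xs.filter (fun y => p < y)
    if hg : k < greater.length then kthLargest greater k
    else
      let e := xs.count p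
      if k < greater.length + e then p
      else kthLargest (xs.filter (fun y => y < p)) (k - greater.length - e)
  termination_by xs _ => xs.length
  decreasing_by
  · simp only [List.length_filter_lt_length_iff_exists]
    exact ⟨p, List.getElem_mem _, by simp only [decide_eq_true_eq]; exact lt_irrefl _⟩
  · simp only [List.length_filter_lt_length_iff_exists]
    exact ⟨p, List.getElem_mem _, by simp only [decide_eq_true_eq]; exact lt_irrefl _⟩

def get_shot_num_alt (train_class_counts : List Int) : List (String × Int) :=
  let n := train_class_counts.length
  let k := n / 3
  let many_thr := kthLargest train_class_counts k
  let low_thr := kthLargest train_class_counts (n - 1 - k)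
  let many : Int := train_class_counts.countP (fun x => many_thr < x)
  let few : Int := train_class_counts.countP (fun x => x < low_thr)
  [("many", many), ("medium", (n : Int) - many - few), ("few", few)]

-- ===== PRECONDITION & SPEC =====
-- Pre_ excludes only the empty list, on which the Python A raises IndexError.
def Pre_get_shot_num (train_class_counts : List Int) : Prop := train_class_counts ≠ []
instance (train_class_counts : List Int) : Decidable (Pre_get_shot_num train_class_counts) := by unfold Pre_get_shot_num; infer_instance
def pvWitness_get_shot_num : List Int := [5, 1, 3]

def Spec_get_shot_num (train_class_counts : List Int) (out : List (String × Int)) : Prop := out = get_shot_num_alt train_class_counts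
instance (train_class_counts : List Int) (out : List (String × Int)) : Decidable (Spec_get_shot_num train_class_counts out) := by unfold Spec_get_shot_num; infer_instance

-- ===== CLAIM (what is proved, stated in full; the proofs are below) =====
def Claim_equal_get_shot_num : Prop := ∀ (train_class_counts : List Int), Dom_get_shot_num train_class_counts → Pre_get_shot_num train_class_counts → Spec_get_shot_num train_class_counts (get_shot_num train_class_counts)

-- ===== LEMMAS AND PROOFS =====
theorem count_filter_of_holds (l : List Int) (q : Int → Bool) (a : Int) (h : q a = true) :
    (l.filter q).count a = l.count a := by
  simp only [List.count, List.countP_filter]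
  exact List.countP_congr fun x _ => by
    cases hx : x == a with
    | true => simp only [beq_iff_eq] at hx; simp [hx, h]
    | false => simp

theorem count_filter_of_not_holds (l : List Int) (q : Int → Bool) (a : Int) (h : q a = false) :
    (l.filter q).count a = 0 := by
  rw [List.count_eq_zero]
  intro hm
  rcases List.mem_filter.mp hm with ⟨-, hq⟩
  rw [h] at hq; exact Bool.noConfusion hq

theorem sortedRev_partition (xs : List Int) (p : Int) :
    PySem.List.sorted xs (fun x => x) true
      = PySem.List.sorted (xs.filter (fun y => p < y)) (fun x => x) true
        ++ List.replicate (xs.count p) p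
        ++ PySem.List.sorted (xs.filter (fun y => y < p)) (fun x => x) true := by
  have h1 := PySem.List.sorted_perm (xs := xs) (key := fun x => x) (rev := true)
  have h2 := PySem.List.sorted_perm (xs := xs.filter (fun y => p < y)) (key := fun x => x) (rev := true)
  have h3 := PySem.List.sorted_perm (xs := xs.filter (fun y => y < p)) (key := fun x => x) (rev := true)
  apply List.Perm.eq_of_pairwise (le := fun a b : Int => b ≤ a)
  · exact fun a b _ _ hab hba => le_antisymm hba hab
  · exact PySem.List.sorted_pairwise_rev xs (fun x => x)
  · -- pairwise ≥ of the concatenation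
    rw [List.pairwise_append]
    refine ⟨?_, ?_, ?_⟩
    · rw [List.pairwise_append]
      refine ⟨PySem.List.sorted_pairwise_rev _ _, ?_, ?_⟩
      · exact List.pairwise_replicate.mpr (Or.inr le_rfl)
      · intro a ha b hb
        rw [PySem.List.mem_sorted] at ha
        rcases List.mem_filter.mp ha with ⟨-, hgt⟩
        rcases List.eq_of_mem_replicate hb with rfl
        exact le_of_lt (by simpa using hgt)
    · exact PySem.List.sorted_pairwise_rev _ _
    · intro a ha b hb
      rw [PySem.List.mem_sorted] at hb
      rcases List.mem_filter.mp hb with ⟨-, hlt⟩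
      rcases List.mem_append.mp ha with ha | ha
      · rw [PySem.List.mem_sorted] at ha
        rcases List.mem_filter.mp ha with ⟨-, hgt⟩
        exact le_of_lt (lt_trans (by simpa using hlt) (by simpa using hgt))
      · rcases List.eq_of_mem_replicate ha with rfl
        exact le_of_lt (by simpa using hlt)
  · -- permutation
    apply h1.trans
    apply List.Perm.trans (l₂ := xs.filter (fun y => p < y) ++ List.replicate (xs.count p) p ++ xs.filter (fun y => y < p))
    · rw [List.perm_iff_count]
      intro a
      simp only [List.count_append, List.count_replicate]
      rcases lt_trichotomy a p with h | h | h
      · rw [count_filter_of_not_holds _ _ _ (by simp [not_lt_of_gt h]),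
            count_filter_of_holds _ _ _ (by simp [h])]
        simp [h.ne']
      · subst h
        rw [count_filter_of_not_holds _ _ _ (by simp),
            count_filter_of_not_holds _ _ _ (by simp)]
        simp
      · rw [count_filter_of_holds _ _ _ (by simp [h]),
            count_filter_of_not_holds _ _ _ (by simp [not_lt_of_gt h])]
        simp [h.ne]
    · exact ((h2.append (List.Perm.refl _)).append h3).symm

theorem kthLargest_eq_sorted_aux (n : Nat) : ∀ (xs : List Int), xs.length ≤ n → ∀ k, k < xs.length →
    (PySem.List.sorted xs (fun x => x) true)[k]? = some (kthLargest xs k) := by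
  induction n with
  | zero => intro xs hn k hk; omega
  | succ n ih =>
    intro xs hn k hk
    match xs with
    | [] => simp at hk
    | x :: t =>
      have hlenpos : 0 < (x :: t).length := Nat.succ_pos _
      set p := (x :: t)[(x :: t).length / 2]'(Nat.div_lt_self (Nat.succ_pos _) (by norm_num)) with hp
      have hpmem : p ∈ x :: t := List.getElem_mem _
      set g := (x :: t).filter (fun y => decide (p < y)) with hg
      set l := (x :: t).filter (fun y => decide (y < p)) with hl
      set c := (x :: t).count p with hc
      have hcount : 1 ≤ c := List.one_le_count_iff.mpr hpmem
      set A := PySem.List.sorted g (fun x => x) true with hA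
      set C := PySem.List.sorted l (fun x => x) true with hC
      have hAlen : A.length = g.length := PySem.List.length_sorted _ _ _
      have hClen : C.length = l.length := PySem.List.length_sorted _ _ _
      have hpart : PySem.List.sorted (x :: t) (fun x => x) true = A ++ List.replicate c p ++ C :=
        sortedRev_partition (x :: t) p
      have hglen : g.length < (x :: t).length := by
        rw [hg, List.length_filter_lt_length_iff_exists]
        exact ⟨p, hpmem, by simp only [decide_eq_true_eq]; exact lt_irrefl _⟩
      have hllen : l.length < (x :: t).length := by
        rw [hl, List.length_filter_lt_length_iff_exists]
        exact ⟨p, hpmem, by simp only [decide_eq_true_eq]; exact lt_irrefl _⟩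
      have hlensum : (x :: t).length = g.length + c + l.length := by
        have h := congrArg List.length hpart
        simp only [List.length_append, List.length_replicate, PySem.List.length_sorted, hAlen, hClen] at h
        omega
      rw [hpart, kthLargest]
      simp only [← hp, ← hg, ← hl, ← hc]
      by_cases h1 : k < g.length
      · rw [dif_pos h1, List.getElem?_append_left (by rw [List.length_append, hAlen]; omega),
            List.getElem?_append_left (by omega : k < A.length)]
        exact ih g (by omega) k h1
      · rw [dif_neg h1]
        by_cases h2 : k < g.length + c
        · rw [if_pos h2,
              List.getElem?_append_left (by simp only [List.length_append, List.length_replicate]; omega),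
              List.getElem?_append_right (by omega : A.length ≤ k),
              List.getElem?_replicate, if_pos (by omega)]
        · rw [if_neg h2,
              List.getElem?_append_right (by simp only [List.length_append, List.length_replicate]; omega)]
          have h3 := ih l (by omega) (k - g.length - c) (by omega)
          rw [← h3]
          congr 1
          simp only [List.length_append, List.length_replicate, hAlen]
          omega

theorem set_update_of_mem (L : List String) (s : PySem.Set String) (h : ∀ x ∈ L, x ∈ s) :
    PySem.Set.update s L = s := by
  induction L generalizing s with
  | nil => rfl
  | cons a L ih =>
    have ha : PySem.Set.add s a = s := by
      simp only [PySem.Set.add, PySem.Set.contains]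
      rw [if_pos (by simpa using h a (by simp))]
    have hstep : PySem.Set.update s (a :: L) = PySem.Set.update (PySem.Set.add s a) L := rfl
    rw [hstep, ha]
    exact ih s fun x hx => h x (by simp [hx])

theorem tri_count (xs : List Int) (many low : Int) (h : low ≤ many) :
    xs.countP (fun i => decide (many < i)) + xs.countP (fun i => decide (i < low))
      + xs.countP (fun i => !decide (many < i) && !decide (i < low)) = xs.length := by
  induction xs with
  | nil => simp
  | cons x t ih =>
    by_cases h1 : many < x <;> by_cases h2 : x < low <;>
      simp [h1, h2] <;> omega

theorem main_thm (xs : List Int) (hpre : xs ≠ []) : get_shot_num xs = get_shot_num_alt xs := by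
  have hn : 0 < xs.length := List.length_pos_iff.mpr hpre
  set n := xs.length with hndef
  set k := n / 3 with hkdef
  have hk : k < n := by omega
  have hk2 : k ≤ n - 1 - k := by omega
  set S := PySem.List.sorted xs (fun x => x) true with hS
  have hSlen : S.length = n := PySem.List.length_sorted _ _ _
  have hmany := kthLargest_eq_sorted_aux n xs le_rfl k hk
  have hlow := kthLargest_eq_sorted_aux n xs le_rfl (n - 1 - k) (by omega)
  rw [← hS] at hmany hlow
  set many := kthLargest xs k with hm
  set low := kthLargest xs (n - 1 - k) with hlo
  have hnum : PySem.Int.floordiv (xs.length : Int) 3 = ((k : Nat) : Int) := by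
    exact_mod_cast PySem.Int.floordiv_natCast n 3
  have hget1 : PySem.List.pyGet? S ((k : Nat) : Int) = some many := by
    rw [PySem.List.pyGet?_natCast]; exact hmany
  have hget2 : PySem.List.pyGet? S (-(((k : Nat) : Int) + 1)) = some low := by
    have hcast : (((k : Nat) : Int) + 1) = ((k + 1 : Nat) : Int) := by push_cast; ring
    rw [hcast, PySem.List.pyGet?_neg_natCast S (k + 1) (by omega) (by omega), hSlen]
    have h : n - (k + 1) = n - 1 - k := by omega
    rw [h]; exact hlow
  have hml : low ≤ many := by
    rcases Nat.lt_or_ge k (n - 1 - k) with hlt | hge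
    · have hp := PySem.List.sorted_pairwise_rev xs (fun x => x)
      rw [← hS] at hp
      have hrel := List.pairwise_iff_getElem.mp hp k (n - 1 - k) (by omega) (by omega) hlt
      have e1 : S[k]'(by omega) = many :=
        Option.some_inj.mp ((List.getElem?_eq_getElem (by omega)).symm.trans hmany)
      have e2 : S[n - 1 - k]'(by omega) = low :=
        Option.some_inj.mp ((List.getElem?_eq_getElem (by omega)).symm.trans hlow)
      rw [e1, e2] at hrel
      exact hrel
    · have h : k = n - 1 - k := by omega
      rw [hm, hlo, ← h]
  -- reduce A to the fold, B to its literal list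
  show (match PySem.List.pyGet? S (PySem.Int.floordiv (xs.length : Int) 3),
              PySem.List.pyGet? S (-(PySem.Int.floordiv (xs.length : Int) 3 + 1)) with
        | some many_shot_thr, some low_shot_thr =>
          (xs.foldl
            (fun d i =>
              if many_shot_thr < i then d.modify "many" 0 (· + 1)
              else if i < low_shot_thr then d.modify "few" 0 (· + 1)
              else d.modify "medium" 0 (· + 1))
            (PySem.Dict.ofList [("many", (0 : Int)), ("medium", 0), ("few", 0)])).items
        | _, _ => [])
      = [("many", (xs.countP (fun x => many < x) : Int)),
         ("medium", (n : Int) - (xs.countP (fun x => many < x) : Int) - (xs.countP (fun x => x < low) : Int)),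
         ("few", (xs.countP (fun x => x < low) : Int))]
  rw [hnum, hget1, hget2]
  simp only []
  -- the counting fold
  set keyOf : Int → String := fun i => if many < i then "many" else if i < low then "few" else "medium" with hkey
  have hstep : (fun (d : PySem.Dict String Int) i =>
      if many < i then d.modify "many" 0 (· + 1)
      else if i < low then d.modify "few" 0 (· + 1)
      else d.modify "medium" 0 (· + 1)) = fun d i => d.modify (keyOf i) 0 (· + 1) := by
    funext d i
    show _ = d.modify (if many < i then "many" else if i < low then "few" else "medium") 0 (· + 1)
    split_ifs <;> rfl
  rw [hstep, ← List.foldl_map (f := keyOf) (g := fun (d : PySem.Dict String Int) x => d.modify x 0 (· + 1))]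
  set d0 : PySem.Dict String Int := PySem.Dict.ofList [("many", (0 : Int)), ("medium", 0), ("few", 0)] with hd0
  set D := (xs.map keyOf).foldl (fun d x => d.modify x 0 (· + 1)) d0 with hD
  have hkeys : D.keys = ["many", "medium", "few"] := by
    rw [hD, PySem.Dict.keys_foldl_modify _ _ (fun _ _ => (· + 1)) d0]
    have : d0.keys = ["many", "medium", "few"] := rfl
    rw [this]
    apply set_update_of_mem
    intro x hx
    rcases List.mem_map.mp hx with ⟨i, -, rfl⟩
    simp only [hkey]
    split_ifs <;> simp
  have hitems := PySem.Dict.items_eq_map_keys D (by rw [hkeys]; decide) 0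
  rw [hitems, hkeys]
  have hgetD : ∀ v, D.getD v 0 = d0.getD v 0 + ((xs.map keyOf).count v : Int) := fun v =>
    PySem.Dict.getD_foldl_modify_add_one (xs.map keyOf) d0 v
  have hcntm : (xs.map keyOf).count "many" = xs.countP (fun x => decide (many < x)) := by
    rw [List.count, List.countP_map]
    apply List.countP_congr
    intro i _
    simp only [Function.comp_apply, hkey]
    split_ifs with h1 h2 <;> simp [h1]
  have hcntf : (xs.map keyOf).count "few" = xs.countP (fun x => decide (x < low)) := by
    rw [List.count, List.countP_map]
    apply List.countP_congr
    intro i _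
    simp only [Function.comp_apply, hkey]
    split_ifs with h1 h2
    · simp
      omega
    · simp [h2]
    · simp [h2]
  have hcntmed : (xs.map keyOf).count "medium"
      = xs.countP (fun i => !decide (many < i) && !decide (i < low)) := by
    rw [List.count, List.countP_map]
    apply List.countP_congr
    intro i _
    simp only [Function.comp_apply, hkey]
    split_ifs with h1 h2
    · simp [h1]
    · simp [h1, h2]
    · simp [h1, h2]
  have htri := tri_count xs many low hml
  simp only [List.map_cons, List.map_nil, hgetD, hcntm, hcntf, hcntmed]
  have hz1 : d0.getD "many" 0 = 0 := rfl
  have hz2 : d0.getD "medium" 0 = 0 := rfl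
  have hz3 : d0.getD "few" 0 = 0 := rfl
  simp only [hz1, hz2, hz3, zero_add]
  have hmed : ((xs.countP (fun i => !decide (many < i) && !decide (i < low)) : Nat) : Int)
      = (n : Int) - ((xs.countP (fun x => decide (many < x)) : Nat) : Int)
        - ((xs.countP (fun x => decide (x < low)) : Nat) : Int) := by
    omega
  rw [hmed]

-- ===== VERDICT (by name: the statement is the Claim_ definition above) =====
theorem get_shot_num_spec : Claim_equal_get_shot_num := by
  intro xs _ hpre
  exact main_thm xs hpre
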